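-- pv_equiv track=rewrite | github.com/AlexFogpk/Voleibol_upravlenie_turnorom | app.py | generate_bracket
-- ===== SOURCE A (Python) =====
-- def generate_bracket(teams):
--     """Generate knockout bracket for given teams using byes."""
--     n = len(teams)
--     if n == 0:
--         return []
--
--     # Next power of two determines full bracket size
--     m = 1
--     while m < n:
--         m *= 2
--
--     teams_copy = teams[:] + [None] * (m - n)
--     bracket = []
--
--     current = [
--         {
--             'team1': teams_copy[i],
--             'team2': teams_copy[i + 1],
--             'score1': None,
--             'score2': None,
--             'winner': None,
--         }
--         for i in range(0, len(teams_copy), 2)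
--     ]
--     bracket.append(current)
--
--     teams_in_round = len(current)
--     while teams_in_round > 1:
--         next_round = [
--             {
--                 'team1': None,
--                 'team2': None,
--                 'score1': None,
--                 'score2': None,
--                 'winner': None,
--             }
--             for _ in range(teams_in_round // 2)
--         ]
--         bracket.append(next_round)
--         teams_in_round //= 2
--
--     advance_byes(bracket)
--     return bracket
--
-- def advance_byes(bracket):
--     """Automatically advance teams where opponent is None."""
--     for round_idx, round_ in enumerate(bracket[:-1]):
--         for match_idx, match in enumerate(round_):
--             if match['winner'] is None:
--                 if match['team1'] is None and match['team2'] is None: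
--                     continue
--                 if match['team1'] is None:
--                     match['winner'] = match['team2']
--                 elif match['team2'] is None:
--                     match['winner'] = match['team1']
--                 else:
--                     continue
--
--                 next_match = bracket[round_idx + 1][match_idx // 2]
--                 pos = 0 if match_idx % 2 == 0 else 1
--                 next_match[f'team{pos + 1}'] = match['winner']
-- ===== SOURCE B (Python) =====
-- def _mk(t1, t2):
--     return {'team1': t1, 'team2': t2, 'score1': None, 'score2': None, 'winner': None}
--
-- def generate_bracket(teams):
--     """Single forward pass: each round is built from the previous round's winners."""
--     n = len(teams)
--     if n == 0:
--         return []
--     m = 1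
--     while m < n:
--         m *= 2
--     padded = teams[:] + [None] * (m - n)
--     cur = [_mk(padded[i], padded[i + 1]) for i in range(0, len(padded), 2)]
--     rounds = []
--     while len(cur) > 1:
--         winners = []
--         for match in cur:
--             t1, t2 = match['team1'], match['team2']
--             w = t2 if t1 is None else (t1 if t2 is None else None)
--             match['winner'] = w
--             winners.append(w)
--         rounds.append(cur)
--         it = iter(winners)
--         cur = [_mk(w1, w2) for w1, w2 in zip(it, it)]
--     rounds.append(cur)
--     return rounds
-- ===== Notes on version B (the rewrite author's own statement) =====
-- stated objective: alternative
-- what changed: A builds an empty bracket skeleton and then runs a separate mutation pass (advance_byes) with index arithmetic into the next round; B makes one forward pass, computing each match's bye-winner and constructing every next round directly from the previous round's winners, with no skeleton and no second pass.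
import Mathlib
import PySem

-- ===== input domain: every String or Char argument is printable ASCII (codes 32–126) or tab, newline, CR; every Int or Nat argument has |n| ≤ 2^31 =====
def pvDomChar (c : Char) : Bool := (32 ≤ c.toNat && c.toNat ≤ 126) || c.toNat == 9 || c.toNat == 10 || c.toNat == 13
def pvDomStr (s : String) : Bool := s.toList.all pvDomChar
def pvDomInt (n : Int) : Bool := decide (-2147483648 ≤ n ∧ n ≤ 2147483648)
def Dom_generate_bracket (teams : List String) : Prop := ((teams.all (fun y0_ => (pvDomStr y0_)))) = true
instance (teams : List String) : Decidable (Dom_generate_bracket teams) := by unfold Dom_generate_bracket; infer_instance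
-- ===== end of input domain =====

-- B replaces A's two-phase build (empty-skeleton + index-arithmetic mutation pass advance_byes)
-- with a single forward pass building each round from the previous round's winners (objective: alternative).

-- ===== PORT A =====
-- Shared with port B only where the two Python sources are literally identical
-- (next-power-of-two loop, padded round-0 comprehension, the match dict literal,
-- and dict get/set on an always-present key).
-- a match dict {'team1': t1, 'team2': t2, 'score1': None, 'score2': None, 'winner': w}
def pvMk (t1 t2 w : Option String) : List (String × Option String) :=
  [("team1", t1), ("team2", t2), ("score1", none), ("score2", none), ("winner", w)]

-- m[k] ; every lookup in both programs is on a key the dict always carries, so getD none never fires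
def pvDGet (m : List (String × Option String)) (k : String) : Option String :=
  ((m.find? (fun p => p.1 == k)).map Prod.snd).getD none

-- m[k] = v on an existing key: overwrite in place (exact Python dict semantics for present keys)
def pvDSet (m : List (String × Option String)) (k : String) (v : Option String) :
    List (String × Option String) :=
  m.map (fun p => if p.1 == k then (k, v) else p)

-- while m < n: m *= 2   (the 0 < m guard only serves termination; both calls start at m = 1)
def pvNextPow (n : Nat) (m : Nat) : Nat :=
  if _h : m < n ∧ 0 < m then pvNextPow n (m * 2) else m
termination_by n - m

-- [ {…teams_copy[i], teams_copy[i+1]…} for i in range(0, len(teams_copy), 2) ] ;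
-- i ≥ 0 always, so plain list indexing is exact; i+1 can only be out of range when
-- len(teams_copy) == 1 (Python raises there; excluded by Pre_), the getD none is junk.
def pvRound0 (tc : List (Option String)) (i : Nat) : List (List (String × Option String)) :=
  if _h : i < tc.length then
    pvMk (tc[i]?.getD none) (tc[i + 1]?.getD none) none :: pvRound0 tc (i + 2)
  else []
termination_by tc.length - i

-- while teams_in_round > 1: append [empty match] * (t // 2); t //= 2
def pvEmptyRounds (t : Nat) : List (List (List (String × Option String))) :=
  if _h : 1 < t then
    List.replicate (t / 2) (pvMk none none none) :: pvEmptyRounds (t / 2)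
  else []
termination_by t

-- body of advance_byes for one match: may set this match's winner and write it into
-- next[match_idx // 2] at field team1/team2 (List.modify: the index is always in range)
def pvProcMatch (midx : Nat) (m : List (String × Option String))
    (next : List (List (String × Option String))) :
    List (String × Option String) × List (List (String × Option String)) :=
  if pvDGet m "winner" = none then
    if pvDGet m "team1" = none ∧ pvDGet m "team2" = none then (m, next)
    else if pvDGet m "team1" = none then
      let m' := pvDSet m "winner" (pvDGet m "team2")
      (m', next.modify (midx / 2) (fun nm =>
        pvDSet nm (if midx % 2 = 0 then "team1" else "team2") (pvDGet m' "winner")))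
    else if pvDGet m "team2" = none then
      let m' := pvDSet m "winner" (pvDGet m "team1")
      (m', next.modify (midx / 2) (fun nm =>
        pvDSet nm (if midx % 2 = 0 then "team1" else "team2") (pvDGet m' "winner")))
    else (m, next)
  else (m, next)

-- inner loop of advance_byes over one round (match_idx counts up; writes go to the next round)
def pvProcRound (midx : Nat) (r : List (List (String × Option String)))
    (next : List (List (String × Option String))) :
    List (List (String × Option String)) × List (List (String × Option String)) :=
  match r with
  | [] => ([], next)
  | m :: rest =>
    let p := pvProcMatch midx m next
    let q := pvProcRound (midx + 1) rest p.2
    (p.1 :: q.1, q.2)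

-- advance_byes: for round_idx, round_ in enumerate(bracket[:-1]) — round i is only ever
-- written by round i-1's pass, so the sequential mutation is this structural recursion
def pvAdvance (bracket : List (List (List (String × Option String)))) :
    List (List (List (String × Option String))) :=
  match bracket with
  | [] => []
  | [r] => [r]
  | r :: nx :: rest =>
    let p := pvProcRound 0 r nx
    p.1 :: pvAdvance (p.2 :: rest)
termination_by bracket.length
decreasing_by simp

def generate_bracket (teams : List String) : List (List (List (String × Option String))) :=
  if teams.length = 0 then []
  else
    let m := pvNextPow teams.length 1
    let tc := teams.map some ++ List.replicate (m - teams.length) none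
    let cur := pvRound0 tc 0
    pvAdvance (cur :: pvEmptyRounds cur.length)

-- ===== PORT B =====
-- w = t2 if t1 is None else (t1 if t2 is None else None)
def pvWinner (m : List (String × Option String)) : Option String :=
  if pvDGet m "team1" = none then pvDGet m "team2"
  else if pvDGet m "team2" = none then pvDGet m "team1"
  else none

-- zip(it, it) over the winners: consecutive pairs
def pvPairUp {α : Type} : List α → List (α × α)
  | a :: b :: rest => (a, b) :: pvPairUp rest
  | _ => []

theorem pvPairUp_length {α : Type} : (l : List α) → (pvPairUp l).length = l.length / 2
  | [] => by simp [pvPairUp]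
  | [a] => by simp [pvPairUp]
  | a :: b :: rest => by
    simp [pvPairUp, pvPairUp_length rest]; omega

-- the while-loop of B: set this round's winners, emit it, recurse on the next round
def pvBuild (cur : List (List (String × Option String))) :
    List (List (List (String × Option String))) :=
  if _h : 1 < cur.length then
    (cur.map (fun m => pvDSet m "winner" (pvWinner m))) ::
      pvBuild ((pvPairUp (cur.map pvWinner)).map (fun p => pvMk p.1 p.2 none))
  else [cur]
termination_by cur.length
decreasing_by simp [pvPairUp_length]; omega

def generate_bracket_alt (teams : List String) : List (List (List (String × Option String))) :=
  if teams.length = 0 then []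
  else
    let m := pvNextPow teams.length 1
    let tc := teams.map some ++ List.replicate (m - teams.length) none
    pvBuild (pvRound0 tc 0)

-- ===== PRECONDITION & SPEC =====
-- Pre_ excludes exactly the single-team list, on which A raises IndexError
-- (teams_copy[i+1] with one element); B raises there too.
def Pre_generate_bracket (teams : List String) : Prop := teams.length ≠ 1
instance (teams : List String) : Decidable (Pre_generate_bracket teams) := by
  unfold Pre_generate_bracket; infer_instance

def pvWitness_generate_bracket : List String := ["a", "b", "c"]

def Spec_generate_bracket (teams : List String) (out : List (List (List (String × Option String)))) : Prop := out = generate_bracket_alt teams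
instance (teams : List String) (out : List (List (List (String × Option String)))) : Decidable (Spec_generate_bracket teams out) := by unfold Spec_generate_bracket; infer_instance

-- ===== CLAIM (what is proved, stated in full; the proofs are below) =====
def Claim_equal_generate_bracket : Prop := ∀ (teams : List String), Dom_generate_bracket teams → Pre_generate_bracket teams → Spec_generate_bracket teams (generate_bracket teams)

-- ===== LEMMAS AND PROOFS =====

-- winner value of a pair of team slots
def pvWv (p : Option String × Option String) : Option String :=
  if p.1 = none then p.2 else if p.2 = none then p.1 else none

-- a round all of whose matches are fresh (winner/scores None)
def pvR (ps : List (Option String × Option String)) : List (List (String × Option String)) :=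
  ps.map (fun p => pvMk p.1 p.2 none)

theorem pvDGet_mk (t1 t2 w : Option String) :
    pvDGet (pvMk t1 t2 w) "team1" = t1 ∧ pvDGet (pvMk t1 t2 w) "team2" = t2 ∧
    pvDGet (pvMk t1 t2 w) "winner" = w := by
  simp [pvDGet, pvMk, List.find?]

theorem pvDSet_mk_winner (t1 t2 w v : Option String) :
    pvDSet (pvMk t1 t2 w) "winner" v = pvMk t1 t2 v := by
  simp [pvDSet, pvMk]

theorem pvDSet_mk_team1 (t1 t2 w v : Option String) :
    pvDSet (pvMk t1 t2 w) "team1" v = pvMk v t2 w := by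
  simp [pvDSet, pvMk]

theorem pvDSet_mk_team2 (t1 t2 w v : Option String) :
    pvDSet (pvMk t1 t2 w) "team2" v = pvMk t1 v w := by
  simp [pvDSet, pvMk]

theorem pvWinner_mk (t1 t2 : Option String) :
    pvWinner (pvMk t1 t2 none) = pvWv (t1, t2) := by
  simp [pvWinner, pvWv, pvDGet_mk]

theorem pvModify_cons_succ {α : Type} (a : α) (l : List α) (n : Nat) (f : α → α) :
    (a :: l).modify (n + 1) f = a :: l.modify n f := by
  simp [List.modify]

theorem pvModify_middle {α : Type} (pre : List α) (x : α) (rest : List α) (f : α → α) :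
    (pre ++ x :: rest).modify pre.length f = pre ++ f x :: rest := by
  induction pre with
  | nil => simp
  | cons a t ih =>
    simp only [List.cons_append, List.length_cons]
    rw [pvModify_cons_succ, ih]

-- one match of advance_byes on a fresh match at an even position, next round shaped
-- pre ++ slot :: tail with an empty team1 slot: writes the bye winner into team1
theorem pvProcMatch_even (p : Option String × Option String)
    (pre tail : List (List (String × Option String))) (s2 : Option String) :
    pvProcMatch (2 * pre.length) (pvMk p.1 p.2 none) (pre ++ pvMk none s2 none :: tail)
      = (pvMk p.1 p.2 (pvWv p), pre ++ pvMk (pvWv p) s2 none :: tail) := by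
  obtain ⟨p1, p2⟩ := p
  have hd : (2 * pre.length) / 2 = pre.length := by omega
  have hm : (2 * pre.length) % 2 = 0 := by omega
  cases p1 <;> cases p2 <;>
    simp [pvProcMatch, pvDGet_mk, pvDSet_mk_winner, pvWv, hd, hm, pvModify_middle,
      pvDSet_mk_team1]

theorem pvProcMatch_odd (p : Option String × Option String)
    (pre tail : List (List (String × Option String))) (s1 : Option String) :
    pvProcMatch (2 * pre.length + 1) (pvMk p.1 p.2 none) (pre ++ pvMk s1 none none :: tail)
      = (pvMk p.1 p.2 (pvWv p), pre ++ pvMk s1 (pvWv p) none :: tail) := by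
  obtain ⟨p1, p2⟩ := p
  have hd : (2 * pre.length + 1) / 2 = pre.length := by omega
  have hm : (2 * pre.length + 1) % 2 = 1 := by omega
  cases p1 <;> cases p2 <;>
    simp [pvProcMatch, pvDGet_mk, pvDSet_mk_winner, pvWv, hd, hm, pvModify_middle,
      pvDSet_mk_team2]

-- the inner pass of advance_byes on a fresh even-length round with an all-empty next round
theorem pvProcRound_key :
    (ps : List (Option String × Option String)) →
    ∀ pre : List (List (String × Option String)), ps.length % 2 = 0 →
    pvProcRound (2 * pre.length) (pvR ps)
        (pre ++ List.replicate (ps.length / 2) (pvMk none none none))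
      = (ps.map (fun p => pvMk p.1 p.2 (pvWv p)),
         pre ++ (pvPairUp ps).map (fun pq => pvMk (pvWv pq.1) (pvWv pq.2) none))
  | [] => by intro pre _; simp [pvR, pvProcRound, pvPairUp]
  | [a] => by intro pre hev; simp at hev
  | p :: q :: rest => by
    intro pre hev
    have hev' : rest.length % 2 = 0 := by simp at hev; omega
    have hlen : (p :: q :: rest).length / 2 = rest.length / 2 + 1 := by simp; omega
    rw [hlen, List.replicate_succ]
    have e1 := pvProcMatch_even p pre
      (List.replicate (rest.length / 2) (pvMk none none none)) none
    have e2 := pvProcMatch_odd q pre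
      (List.replicate (rest.length / 2) (pvMk none none none)) (pvWv p)
    have ih := pvProcRound_key rest (pre ++ [pvMk (pvWv p) (pvWv q) none]) hev'
    simp only [List.append_assoc, List.singleton_append, List.length_append,
      List.length_cons, List.length_nil] at ih
    simp only [pvR, List.map_cons] at *
    simp only [pvProcRound]
    rw [e1]
    simp only []
    rw [show 2 * pre.length + 1 = 2 * pre.length + 1 from rfl, e2]
    simp only []
    rw [show 2 * pre.length + 1 + 1 = 2 * (pre.length + 1) by ring, ih]
    simp [pvPairUp]
termination_by ps => ps.length

theorem pvPairUp_map {α β : Type} (f : α → β) :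
    (l : List α) → pvPairUp (l.map f) = (pvPairUp l).map (fun p => (f p.1, f p.2))
  | [] => by simp [pvPairUp]
  | [a] => by simp [pvPairUp]
  | a :: b :: rest => by simp [pvPairUp, pvPairUp_map f rest]

-- main induction: A's skeleton-plus-advance equals B's forward pass, on fresh rounds of
-- power-of-two length
theorem pvMain (k : Nat) : ∀ ps : List (Option String × Option String), ps.length = 2 ^ k →
    pvAdvance (pvR ps :: pvEmptyRounds ps.length) = pvBuild (pvR ps) := by
  induction k with
  | zero =>
    intro ps h
    match ps, h with
    | [p], _ =>
      rw [pvEmptyRounds, pvBuild]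
      simp [pvAdvance, pvR]
  | succ k ih =>
    intro ps h
    have h2 : 1 < ps.length := by rw [h]; exact Nat.one_lt_two_pow (by omega)
    have hev : ps.length % 2 = 0 := by rw [h, Nat.pow_succ]; omega
    have hhalf : ps.length / 2 = 2 ^ k := by rw [h, Nat.pow_succ]; omega
    have hkey := pvProcRound_key ps ([] : List (List (String × Option String))) hev
    simp only [List.length_nil, Nat.mul_zero, List.nil_append] at hkey
    -- unfold one step of the empty-skeleton builder
    rw [show pvEmptyRounds ps.length
        = List.replicate (ps.length / 2) (pvMk none none none) :: pvEmptyRounds (ps.length / 2)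
      from by rw [pvEmptyRounds, dif_pos h2]]
    -- one step of pvAdvance
    rw [show pvAdvance (pvR ps :: List.replicate (ps.length / 2) (pvMk none none none)
          :: pvEmptyRounds (ps.length / 2))
        = (pvProcRound 0 (pvR ps) (List.replicate (ps.length / 2) (pvMk none none none))).1
          :: pvAdvance ((pvProcRound 0 (pvR ps)
              (List.replicate (ps.length / 2) (pvMk none none none))).2
            :: pvEmptyRounds (ps.length / 2)) from by rw [pvAdvance]]
    rw [hkey]
    -- one step of pvBuild
    rw [show pvBuild (pvR ps)
        = ((pvR ps).map (fun m => pvDSet m "winner" (pvWinner m))) ::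
            pvBuild ((pvPairUp ((pvR ps).map pvWinner)).map (fun p => pvMk p.1 p.2 none))
      from by rw [pvBuild, dif_pos (by simpa [pvR] using h2)]]
    have hmapw : (pvR ps).map (fun m => pvDSet m "winner" (pvWinner m))
        = ps.map (fun p => pvMk p.1 p.2 (pvWv p)) := by
      simp [pvR, List.map_map, pvWinner_mk, pvDSet_mk_winner]
    have hwin : (pvR ps).map pvWinner = ps.map pvWv := by
      simp [pvR, List.map_map, pvWinner_mk]
    have hnext : (pvPairUp ((pvR ps).map pvWinner)).map (fun p => pvMk p.1 p.2 none)
        = pvR ((pvPairUp ps).map (fun pq => (pvWv pq.1, pvWv pq.2))) := by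
      rw [hwin, pvPairUp_map]
      simp [pvR, List.map_map]
    rw [hmapw, hnext]
    have hRnext : (pvPairUp ps).map (fun pq => pvMk (pvWv pq.1) (pvWv pq.2) none)
        = pvR ((pvPairUp ps).map (fun pq => (pvWv pq.1, pvWv pq.2))) := by
      simp [pvR, List.map_map, Function.comp]
    rw [hRnext]
    have hlen' : ((pvPairUp ps).map (fun pq => (pvWv pq.1, pvWv pq.2))).length = 2 ^ k := by
      simp [pvPairUp_length, hhalf]
    rw [show pvEmptyRounds (ps.length / 2)
        = pvEmptyRounds (((pvPairUp ps).map (fun pq => (pvWv pq.1, pvWv pq.2))).length)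
      from by rw [hlen', hhalf]]
    exact congrArg _ (ih _ hlen')

-- round 0 built by the shared index loop is the paired fresh round
theorem pvRound0_eq :
    (tc : List (Option String)) → ∀ pre : List (Option String), tc.length % 2 = 0 →
    pvRound0 (pre ++ tc) pre.length = pvR (pvPairUp tc)
  | [] => by
    intro pre _
    rw [pvRound0]
    simp [pvPairUp, pvR]
  | [a] => by intro pre hev; simp at hev
  | a :: b :: rest => by
    intro pre hev
    have hev' : rest.length % 2 = 0 := by simp at hev; omega
    have ih := pvRound0_eq rest (pre ++ [a, b]) hev'
    rw [pvRound0, dif_pos (by simp)]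
    have g1 : (pre ++ a :: b :: rest)[pre.length]?.getD none = a := by
      rw [List.getElem?_append_right (Nat.le_refl _)]
      simp
    have g2 : (pre ++ a :: b :: rest)[pre.length + 1]?.getD none = b := by
      rw [List.getElem?_append_right (by omega)]
      simp [show pre.length + 1 - pre.length = 1 by omega]
    rw [g1, g2]
    have harr : pre ++ a :: b :: rest = (pre ++ [a, b]) ++ rest := by simp
    have hlen2 : pre.length + 2 = (pre ++ [a, b]).length := by simp
    rw [harr, hlen2, ih]
    simp [pvPairUp, pvR]
termination_by tc => tc.length

-- the next-power-of-two loop yields a power of two at least n (starting from a power of two)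
theorem pvNextPow_spec (n m : Nat) : (∃ j, m = 2 ^ j) →
    n ≤ pvNextPow n m ∧ ∃ k, pvNextPow n m = 2 ^ k := by
  fun_induction pvNextPow n m with
  | case1 m _h ih =>
    intro ⟨j, hj⟩
    exact ih ⟨j + 1, by rw [hj]; ring⟩
  | case2 m h =>
    intro ⟨j, hj⟩
    have hpos : 0 < m := by rw [hj]; exact Nat.pow_pos (by omega)
    exact ⟨by omega, j, hj⟩

-- the whole non-empty case: a padded team list of length 2^(k'+1)
theorem pvTop (tc : List (Option String)) (k' : Nat) (hlen : tc.length = 2 ^ (k' + 1)) :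
    pvAdvance (pvRound0 tc 0 :: pvEmptyRounds (pvRound0 tc 0).length)
      = pvBuild (pvRound0 tc 0) := by
  have hev : tc.length % 2 = 0 := by rw [hlen, Nat.pow_succ]; omega
  have hr0 : pvRound0 tc 0 = pvR (pvPairUp tc) := by
    have := pvRound0_eq tc [] hev
    simpa using this
  have hpl : (pvPairUp tc).length = 2 ^ k' := by
    rw [pvPairUp_length, hlen, Nat.pow_succ]; omega
  rw [hr0, show (pvR (pvPairUp tc)).length = (pvPairUp tc).length from by simp [pvR]]
  exact pvMain k' (pvPairUp tc) hpl

-- ===== VERDICT (by name: the statement is the Claim_ definition above) =====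
theorem generate_bracket_spec : Claim_equal_generate_bracket := by
  intro teams _ hpre
  unfold Spec_generate_bracket generate_bracket generate_bracket_alt
  by_cases h0 : teams.length = 0
  · simp [h0]
  · rw [if_neg h0, if_neg h0]
    have hn : 2 ≤ teams.length := by
      unfold Pre_generate_bracket at hpre; omega
    obtain ⟨hle, k, hk⟩ := pvNextPow_spec teams.length 1 ⟨0, rfl⟩
    have hk1 : 1 ≤ k := by
      by_contra hc
      have : k = 0 := by omega
      rw [this] at hk; omega
    obtain ⟨k', rfl⟩ : ∃ k', k = k' + 1 := ⟨k - 1, by omega⟩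
    have hlen : (teams.map some
        ++ List.replicate (pvNextPow teams.length 1 - teams.length) none).length
        = 2 ^ (k' + 1) := by simp; omega
    exact pvTop _ k' hlen
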